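-- pv_equiv track=rewrite | github.com/Nishchaie/ch.ai | src/chai/knowledge/gardener.py | fix_issues
-- ===== SOURCE A (Python) =====
-- from typing import List, Optional, Set
--
-- def fix_issues(issues: List[str]) -> List[str]:
--     """Produce fix descriptions for issues. Returns list of fix descriptions."""
--     fixes: List[str] = []
--     for issue in issues:
--         if "Broken link" in issue:
--             fixes.append(f"Update or remove broken link: {issue}")
--         elif "stale reference" in issue:
--             fixes.append(f"Update reference or remove: {issue}")
--         elif "Cannot read" in issue:
--             fixes.append(f"Fix file encoding or restore: {issue}")
--         else:
--             fixes.append(f"Review and fix: {issue}")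
--     return fixes
-- ===== SOURCE B (Python) =====
-- def fix_issues(issues):
--     """Produce fix descriptions for issues. Returns list of fix descriptions."""
--     rules = [
--         ("Broken link", "Update or remove broken link: "),
--         ("stale reference", "Update reference or remove: "),
--         ("Cannot read", "Fix file encoding or restore: "),
--     ]
--     # Staged passes: default everywhere, then sweep rules in reverse priority
--     # order so that an earlier rule's rewrite overwrites a later rule's.
--     fixes = ["Review and fix: " + issue for issue in issues]
--     for key, template in reversed(rules):
--         fixes = [template + issue if key in issue else fix
--                  for issue, fix in zip(issues, fixes)]
--     return fixes
-- ===== Notes on version B (the rewrite author's own statement) =====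
-- stated objective: alternative
-- what changed: Inverts the loop nesting: instead of one pass over issues with an if/elif chain per element, B starts from the default fix for every issue and makes one whole-list pass per rule in reverse priority order, overwriting matches so higher-priority rules win.
import Mathlib
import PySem

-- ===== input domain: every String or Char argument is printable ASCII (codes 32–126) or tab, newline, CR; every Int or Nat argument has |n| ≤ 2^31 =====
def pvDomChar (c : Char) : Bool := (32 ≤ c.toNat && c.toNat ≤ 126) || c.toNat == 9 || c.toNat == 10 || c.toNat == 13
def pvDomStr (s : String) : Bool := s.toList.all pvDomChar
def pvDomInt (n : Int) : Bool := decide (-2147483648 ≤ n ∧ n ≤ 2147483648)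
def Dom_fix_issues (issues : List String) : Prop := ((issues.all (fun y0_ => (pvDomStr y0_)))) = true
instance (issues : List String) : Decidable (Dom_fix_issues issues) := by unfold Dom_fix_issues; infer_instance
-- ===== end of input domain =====

-- B inverts the loop nesting: default fixes first, then one whole-list pass per rule in reverse priority order (alternative structure; same cost). 


-- ===== PORT A =====
def fix_issues (issues : List String) : List String :=
  issues.foldl (fun fixes issue =>
    if PySem.Str.isIn "Broken link" issue then
      fixes ++ ["Update or remove broken link: " ++ issue]
    else if PySem.Str.isIn "stale reference" issue then
      fixes ++ ["Update reference or remove: " ++ issue]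
    else if PySem.Str.isIn "Cannot read" issue then
      fixes ++ ["Fix file encoding or restore: " ++ issue]
    else
      fixes ++ ["Review and fix: " ++ issue]) []

-- ===== PORT B =====
def fixRules : List (String × String) :=
  [("Broken link", "Update or remove broken link: "),
   ("stale reference", "Update reference or remove: "),
   ("Cannot read", "Fix file encoding or restore: ")]

-- one whole-list pass for one rule: overwrite the fix wherever the keyword matches
def applyRule (issues : List String) (fixes : List String) (kt : String × String) : List String :=
  (issues.zip fixes).map (fun p => if PySem.Str.isIn kt.1 p.1 then kt.2 ++ p.1 else p.2)

def fix_issues_alt (issues : List String) : List String :=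
  fixRules.reverse.foldl (applyRule issues)
    (issues.map (fun issue => "Review and fix: " ++ issue))

-- ===== PRECONDITION & SPEC =====
def Spec_fix_issues (issues : List String) (out : List String) : Prop := out = fix_issues_alt issues
instance (issues : List String) (out : List String) : Decidable (Spec_fix_issues issues out) := by unfold Spec_fix_issues; infer_instance

-- ===== CLAIM (what is proved, stated in full; the proofs are below) =====
def Claim_equal_fix_issues : Prop := ∀ (issues : List String), Dom_fix_issues issues → Spec_fix_issues issues (fix_issues issues)

-- ===== LEMMAS AND PROOFS =====
-- the per-issue classification both programs compute
def fixOneChain (issue : String) : String :=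
  if PySem.Str.isIn "Broken link" issue then "Update or remove broken link: " ++ issue
  else if PySem.Str.isIn "stale reference" issue then "Update reference or remove: " ++ issue
  else if PySem.Str.isIn "Cannot read" issue then "Fix file encoding or restore: " ++ issue
  else "Review and fix: " ++ issue

theorem fixA_eq_map (issues acc : List String) :
    issues.foldl (fun fixes issue =>
      if PySem.Str.isIn "Broken link" issue then
        fixes ++ ["Update or remove broken link: " ++ issue]
      else if PySem.Str.isIn "stale reference" issue then
        fixes ++ ["Update reference or remove: " ++ issue]
      else if PySem.Str.isIn "Cannot read" issue then
        fixes ++ ["Fix file encoding or restore: " ++ issue]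
      else
        fixes ++ ["Review and fix: " ++ issue]) acc
    = acc ++ issues.map fixOneChain := by
  induction issues generalizing acc with
  | nil => simp
  | cons x xs ih =>
    simp only [List.foldl_cons, List.map_cons]
    rw [show (if PySem.Str.isIn "Broken link" x then
        acc ++ ["Update or remove broken link: " ++ x]
      else if PySem.Str.isIn "stale reference" x then
        acc ++ ["Update reference or remove: " ++ x]
      else if PySem.Str.isIn "Cannot read" x then
        acc ++ ["Fix file encoding or restore: " ++ x]
      else
        acc ++ ["Review and fix: " ++ x]) = acc ++ [fixOneChain x] by
      unfold fixOneChain; split_ifs <;> rfl]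
    rw [ih]; simp

theorem fixB_eq_map (issues : List String) :
    fix_issues_alt issues = issues.map fixOneChain := by
  induction issues with
  | nil => rfl
  | cons x xs ih =>
    simp only [fix_issues_alt, fixRules, List.reverse_cons, List.reverse_nil,
      List.nil_append, List.cons_append, List.foldl_cons, List.foldl_nil,
      applyRule, List.map_cons, List.zip_cons_cons] at ih ⊢
    rw [← ih]
    unfold fixOneChain
    split_ifs <;> rfl

-- ===== VERDICT (by name: the statement is the Claim_ definition above) =====
theorem fix_issues_spec : Claim_equal_fix_issues := by
  intro issues _
  unfold Spec_fix_issues fix_issues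
  rw [fixA_eq_map, fixB_eq_map]; simp
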